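-- pv_equiv track=rewrite | github.com/alea-institute/folio-insights | src/folio_insights/services/task_exporter.py | group_units_by_type
-- ===== SOURCE A (Python) =====
-- from collections import defaultdict
--
-- _TYPE_DISPLAY_ORDER = [
--     ("best_practice", "Best Practices"),
--     ("principle", "Principles"),
--     ("pitfall", "Pitfalls"),
--     ("procedural_rule", "Procedural Rules"),
--     ("citation", "Citations"),
--     ("advice", "Advice"),
--     ("unknown", "Other"),
-- ]
--
-- def group_units_by_type(units: list[dict]) -> dict[str, list[dict]]:
--     """Group knowledge units by their unit_type field.
--
--     Returns a dict mapping type names to lists of unit dicts,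
--     in the display order defined by _TYPE_DISPLAY_ORDER.
--     """
--     groups: dict[str, list[dict]] = defaultdict(list)
--     for u in units:
--         utype = u.get("unit_type", "unknown")
--         groups[utype].append(u)
--
--     # Return in display order, only including non-empty groups
--     ordered: dict[str, list[dict]] = {}
--     for type_key, _label in _TYPE_DISPLAY_ORDER:
--         if type_key in groups:
--             ordered[type_key] = groups[type_key]
--
--     # Add any types not in the display order
--     for type_key, unit_list in groups.items():
--         if type_key not in ordered:
--             ordered[type_key] = unit_list
--
--     return ordered
-- ===== SOURCE B (Python) =====
-- _TYPE_DISPLAY_ORDER = [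
--     ("best_practice", "Best Practices"),
--     ("principle", "Principles"),
--     ("pitfall", "Pitfalls"),
--     ("procedural_rule", "Procedural Rules"),
--     ("citation", "Citations"),
--     ("advice", "Advice"),
--     ("unknown", "Other"),
-- ]
--
--
-- def group_units_by_type(units: list[dict]) -> dict[str, list[dict]]:
--     """Group knowledge units by unit_type, display-order keys first."""
--     typed = [(u.get("unit_type", "unknown"), u) for u in units]
--     display = [k for k, _ in _TYPE_DISPLAY_ORDER]
--     extras = [k for k in dict.fromkeys(t for t, _ in typed) if k not in display]
--     return {k: [u for t, u in typed if t == k]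
--             for k in display + extras
--             if any(t == k for t, _ in typed)}
-- ===== Notes on version B (the rewrite author's own statement) =====
-- stated objective: simpler
-- what changed: Replaces the defaultdict-of-lists plus two dict-building ordering loops by a direct comprehension: compute the key order as display keys followed by first-appearance extras, then build each group by filtering the (type, unit) pairs per key.
import Mathlib
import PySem

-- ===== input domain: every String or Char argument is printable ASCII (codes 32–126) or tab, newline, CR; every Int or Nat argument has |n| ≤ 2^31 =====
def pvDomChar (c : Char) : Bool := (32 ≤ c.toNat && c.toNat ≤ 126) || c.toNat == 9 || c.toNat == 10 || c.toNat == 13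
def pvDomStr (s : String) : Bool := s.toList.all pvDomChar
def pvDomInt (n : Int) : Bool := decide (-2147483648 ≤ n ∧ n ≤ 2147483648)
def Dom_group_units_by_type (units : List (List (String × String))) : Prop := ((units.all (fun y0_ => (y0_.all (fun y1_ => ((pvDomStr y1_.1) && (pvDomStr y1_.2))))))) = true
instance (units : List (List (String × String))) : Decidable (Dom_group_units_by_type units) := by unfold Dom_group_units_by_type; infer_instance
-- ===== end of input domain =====

-- B replaces A's defaultdict + two dict-rebuilding ordering loops by one key-order list and a per-key filter comprehension (simpler decomposition, same values).


-- shared module constant _TYPE_DISPLAY_ORDER and the accessor u.get("unit_type","unknown")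
def pvDisplayOrder : List (String × String) :=
  [("best_practice", "Best Practices"),
   ("principle", "Principles"),
   ("pitfall", "Pitfalls"),
   ("procedural_rule", "Procedural Rules"),
   ("citation", "Citations"),
   ("advice", "Advice"),
   ("unknown", "Other")]

def pvUtype (u : List (String × String)) : String :=
  (PySem.Dict.mk u).getD "unit_type" "unknown"

-- ===== PORT A =====
def group_units_by_type (units : List (List (String × String))) : List (String × List (List (String × String))) :=
  let groups := units.foldl (fun d u => d.modify (pvUtype u) [] (· ++ [u])) PySem.Dict.empty
  let ordered := pvDisplayOrder.foldl
    (fun d p => if groups.contains p.1 then d.insert p.1 (groups.getD p.1 []) else d)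
    PySem.Dict.empty
  let ordered2 := groups.items.foldl
    (fun d p => if d.contains p.1 then d else d.insert p.1 p.2) ordered
  ordered2.items

-- ===== PORT B =====
def group_units_by_type_alt (units : List (List (String × String))) : List (String × List (List (String × String))) :=
  let typed := units.map (fun u => (pvUtype u, u))
  let display := pvDisplayOrder.map (·.1)
  let extras := (PySem.List.dedup (typed.map (·.1))).filter (fun k => !display.contains k)
  ((display ++ extras).filter (fun k => typed.any (fun p => p.1 == k))).map
    (fun k => (k, (typed.filter (fun p => p.1 == k)).map (·.2)))

-- ===== PRECONDITION & SPEC =====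
def Spec_group_units_by_type (units : List (List (String × String))) (out : List (String × List (List (String × String)))) : Prop := out = group_units_by_type_alt units
instance (units : List (List (String × String))) (out : List (String × List (List (String × String)))) : Decidable (Spec_group_units_by_type units out) := by unfold Spec_group_units_by_type; infer_instance

-- ===== CLAIM (what is proved, stated in full; the proofs are below) =====
def Claim_equal_group_units_by_type : Prop := ∀ (units : List (List (String × String))), Dom_group_units_by_type units → Spec_group_units_by_type units (group_units_by_type units)

-- ===== LEMMAS AND PROOFS =====

theorem pv_items_foldl_cond_insert {ν : Type} (G : PySem.Dict String ν) (dflt : ν) :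
    ∀ (ks : List (String × String)) (d : PySem.Dict String ν),
      (ks.map (·.1)).Nodup → (∀ p ∈ ks, d.contains p.1 = false) →
      (ks.foldl (fun d p => if G.contains p.1 then d.insert p.1 (G.getD p.1 dflt) else d) d).items
        = d.items ++ (ks.filter (fun p => G.contains p.1)).map (fun p => (p.1, G.getD p.1 dflt)) := by
  intro ks
  induction ks with
  | nil => intro d _ _; simp
  | cons p ks ih =>
    intro d hnd hfresh
    simp only [List.map_cons, List.nodup_cons] at hnd
    by_cases hG : G.contains p.1 = true
    · rw [List.foldl_cons, if_pos hG,
        ih _ hnd.2 (by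
          intro q hq
          rw [PySem.Dict.contains_insert]
          have h1 : (q.1 == p.1) = false := by
            simp only [beq_eq_false_iff_ne, ne_eq]
            intro h; exact hnd.1 (h ▸ List.mem_map_of_mem hq)
          simp [h1, hfresh q (List.mem_cons_of_mem _ hq)]),
        PySem.Dict.items_insert_of_not_contains _ _ (hfresh p (by simp))]
      simp [hG]
    · rw [List.foldl_cons, if_neg hG, ih _ hnd.2 (fun q hq => hfresh q (List.mem_cons_of_mem _ hq))]
      simp [hG]

theorem pv_items_foldl_setdefault {ν : Type} :
    ∀ (l : List (String × ν)) (d : PySem.Dict String ν), (l.map (·.1)).Nodup →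
      (l.foldl (fun d p => if d.contains p.1 then d else d.insert p.1 p.2) d).items
        = d.items ++ l.filter (fun p => !d.contains p.1) := by
  intro l
  induction l with
  | nil => intro d _; simp
  | cons p l ih =>
    intro d hnd
    simp only [List.map_cons, List.nodup_cons] at hnd
    by_cases hc : d.contains p.1 = true
    · rw [List.foldl_cons, if_pos hc, ih _ hnd.2]
      simp [hc]
    · rw [List.foldl_cons, if_neg hc, ih _ hnd.2,
        PySem.Dict.items_insert_of_not_contains _ _ (by simpa using hc)]
      have hfc : l.filter (fun q => !(d.insert p.1 p.2).contains q.1)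
          = l.filter (fun q => !d.contains q.1) := by
        apply List.filter_congr
        intro q hq
        rw [PySem.Dict.contains_insert]
        have h1 : (q.1 == p.1) = false := by
          simp only [beq_eq_false_iff_ne, ne_eq]
          intro h; exact hnd.1 (h ▸ List.mem_map_of_mem hq)
        simp [h1]
      simp [hc, hfc]

theorem pv_filter_map_pair {ν : Type} (G : PySem.Dict String ν) (dflt : ν) :
    ∀ (l : List (String × String)),
      (l.filter (fun p => G.contains p.1)).map (fun p => (p.1, G.getD p.1 dflt))
        = ((l.map (·.1)).filter (fun k => G.contains k)).map (fun k => (k, G.getD k dflt)) := by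
  intro l
  induction l with
  | nil => rfl
  | cons p l ih => by_cases h : G.contains p.1 = true <;> simp [h, ih]

theorem pv_map_fst_pair {ν : Type} (G : PySem.Dict String ν) (dflt : ν) :
    ∀ (ks : List String), (ks.map (fun k => (k, G.getD k dflt))).map (·.1) = ks := by
  intro ks
  induction ks with
  | nil => rfl
  | cons k ks ih => simp [ih]

theorem pv_filter_map_pair_keys {ν : Type} (G : PySem.Dict String ν) (dflt : ν) (Q : String × ν → Bool) :
    ∀ (ks : List String),
      (ks.map (fun k => (k, G.getD k dflt))).filter Q
        = (ks.filter (fun k => Q (k, G.getD k dflt))).map (fun k => (k, G.getD k dflt)) := by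
  intro ks
  induction ks with
  | nil => rfl
  | cons k ks ih => by_cases h : Q (k, G.getD k dflt) = true <;> simp [h, ih]

theorem pv_main_eq (units : List (List (String × String))) :
    group_units_by_type units = group_units_by_type_alt units := by
  simp only [group_units_by_type, group_units_by_type_alt]
  set typed := units.map (fun u => (pvUtype u, u)) with htyped
  set G := units.foldl (fun d u => d.modify (pvUtype u) [] (· ++ [u])) PySem.Dict.empty with hGdef
  set display := pvDisplayOrder.map (·.1) with hdisplay
  have hGfold : G = typed.foldl (fun d p => d.modify p.1 [] (· ++ [p.2])) PySem.Dict.empty := by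
    rw [htyped, List.foldl_map]
  have hGetD : ∀ k, G.getD k [] = (typed.filter (fun p => p.1 == k)).map (·.2) := by
    intro k
    rw [hGfold, PySem.Dict.getD_foldl_modify_append]
    simp
  have hKeys : G.keys = PySem.List.dedup (typed.map (·.1)) := by
    have h := PySem.Dict.keys_foldl_modify_key (ν := List (List (String × String)))
      typed (fun p => p.1) [] (fun _ p => (· ++ [p.2])) PySem.Dict.empty
    rw [PySem.Dict.keys_empty, PySem.Set.update_nil_left] at h
    rw [hGfold, PySem.List.dedup_eq_ofList]
    simpa using h
  have hNodup : G.keys.Nodup := by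
    rw [hKeys]; exact PySem.List.nodup_dedup _
  have hContains : ∀ k, (G.contains k = true) ↔ k ∈ typed.map (·.1) := by
    intro k
    rw [PySem.Dict.contains_iff_mem_keys, hKeys, PySem.List.mem_dedup]
  -- first ordering loop
  set O := pvDisplayOrder.foldl
    (fun d p => if G.contains p.1 then d.insert p.1 (G.getD p.1 [])  else d)
    PySem.Dict.empty with hOdef
  have hOitems : O.items = (display.filter (fun k => G.contains k)).map (fun k => (k, G.getD k [])) := by
    rw [hOdef, pv_items_foldl_cond_insert G [] pvDisplayOrder PySem.Dict.empty (by decide)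
      (fun p _ => PySem.Dict.contains_empty _), pv_filter_map_pair]
    have he : (PySem.Dict.empty : PySem.Dict String (List (List (String × String)))).items = [] := rfl
    rw [he, List.nil_append, hdisplay]
  have hOkeys : O.keys = display.filter (fun k => G.contains k) := by
    show O.items.map (·.1) = _
    rw [hOitems, pv_map_fst_pair]
  -- second loop
  have hGitems : G.items = G.keys.map (fun k => (k, G.getD k [])) :=
    PySem.Dict.items_eq_map_keys G hNodup []
  have hGitemsKeysNodup : (G.items.map (·.1)).Nodup := by
    rw [hGitems, pv_map_fst_pair]
    exact hNodup
  have hA : (G.items.foldl (fun d p => if d.contains p.1 then d else d.insert p.1 p.2) O).items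
      = O.items ++ (G.keys.filter (fun k => !display.contains k)).map (fun k => (k, G.getD k [])) := by
    rw [pv_items_foldl_setdefault G.items O hGitemsKeysNodup]
    congr 1
    rw [hGitems, pv_filter_map_pair_keys]
    congr 1
    apply List.filter_congr
    intro k hk
    have hkG : G.contains k = true := (PySem.Dict.contains_iff_mem_keys G k).mpr hk
    show (!O.contains k) = !display.contains k
    rw [PySem.Dict.contains_eq_decide_mem_keys, hOkeys]
    simp [List.mem_filter, hkG]
  -- B side
  have hany : ∀ k, typed.any (fun p => p.1 == k) = G.contains k := by
    intro k
    rw [Bool.eq_iff_iff, hContains k]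
    simp [List.any_eq_true, List.mem_map]
  have hpairfun : (fun k => ((k : String), (typed.filter (fun p => p.1 == k)).map (·.2)))
      = (fun k => (k, G.getD k [])) := by
    funext k; rw [hGetD]
  have hextras : (PySem.List.dedup (typed.map (·.1))).filter (fun k => !display.contains k)
      = G.keys.filter (fun k => !display.contains k) := by
    rw [hKeys]
  -- assemble
  rw [hA, hOitems, hpairfun, hextras]
  have hanyfun : (fun k => typed.any (fun p => p.1 == k)) = (fun k => G.contains k) := funext hany
  rw [hanyfun, List.filter_append, ← List.map_append]
  congr 1
  congr 1
  symm
  apply (List.filter_eq_self).mpr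
  intro k hk
  exact (PySem.Dict.contains_iff_mem_keys G k).mpr (List.mem_of_mem_filter hk)

-- ===== VERDICT (by name: the statement is the Claim_ definition above) =====
theorem group_units_by_type_spec : Claim_equal_group_units_by_type := by
  intro units _
  unfold Spec_group_units_by_type
  exact pv_main_eq units
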